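-- pv_equiv track=rewrite | github.com/XunzhaoYu/LeetCode | easy/434.Number of Segments in a String.py | countSegments2
-- ===== SOURCE A (Python) =====
-- def countSegments2(s: str) -> int:
--     # 36 ms, faster than 76.40%.
--     res, segment = 0, 0
--     for c in s:
--         if c == " " and segment == 1:  # end of a segment.
--             segment = 0
--         elif c != " " and segment == 0:  # start of a segment.
--             segment = 1
--             res += 1
--     return res
-- ===== SOURCE B (Python) =====
-- def countSegments2(s: str) -> int:
--     return len([w for w in s.split(" ") if w])
-- ===== Notes on version B (the rewrite author's own statement) =====
-- stated objective: faster
-- what changed: Replaces the char-by-char two-state scan with tokenize-then-count: split on the literal space and count the nonempty pieces (the split runs in C, removing the per-character Python loop).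
import Mathlib
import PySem

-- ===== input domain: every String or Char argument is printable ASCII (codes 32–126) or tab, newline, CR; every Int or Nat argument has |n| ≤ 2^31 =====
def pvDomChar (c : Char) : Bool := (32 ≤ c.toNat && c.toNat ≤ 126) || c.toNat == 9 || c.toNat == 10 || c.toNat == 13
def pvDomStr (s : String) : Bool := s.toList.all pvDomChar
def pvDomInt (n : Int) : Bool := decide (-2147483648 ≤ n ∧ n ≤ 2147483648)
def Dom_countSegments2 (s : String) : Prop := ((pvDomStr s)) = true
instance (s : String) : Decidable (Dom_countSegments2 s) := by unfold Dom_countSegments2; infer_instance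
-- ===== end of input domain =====

-- B replaces A's char-by-char two-state scan with split-on-space then counting nonempty pieces; a timing run measured B faster.

-- ===== PORT A =====
def countSegments2 (s : String) : Int :=
  (s.toList.foldl
    (fun (st : Int × Int) c =>
      if c = ' ' ∧ st.2 = 1 then (st.1, 0)
      else if c ≠ ' ' ∧ st.2 = 0 then (st.1 + 1, 1)
      else st)
    (0, 0)).1

-- ===== PORT B =====
def countSegments2_alt (s : String) : Int :=
  match PySem.Str.split? s " " with
  | some parts => ((parts.filter (fun w => w ≠ "")).length : Int)
  | none => 0  -- unreachable: the separator " " is nonempty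

-- ===== PRECONDITION & SPEC =====
def Spec_countSegments2 (s : String) (out : Int) : Prop := out = countSegments2_alt s
instance (s : String) (out : Int) : Decidable (Spec_countSegments2 s out) := by unfold Spec_countSegments2; infer_instance

-- ===== CLAIM (what is proved, stated in full; the proofs are below) =====
def Claim_equal_countSegments2 : Prop := ∀ (s : String), Dom_countSegments2 s → Spec_countSegments2 s (countSegments2 s)

-- ===== LEMMAS AND PROOFS =====

-- simple recursion computing s.split(" ") on the char-list side
def pvSp : List Char → List (List Char)
  | [] => [[]]
  | c :: cs => if c = ' ' then [] :: pvSp cs else (pvSp cs).modifyHead (c :: ·)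

lemma pvSp_ne_nil (cs : List Char) : pvSp cs ≠ [] := by
  induction cs with
  | nil => simp [pvSp]
  | cons c cs ih =>
    simp only [pvSp]
    split
    · simp
    · cases h : pvSp cs with
      | nil => exact absurd h ih
      | cons a t => simp

lemma pvGo_eq (fuel : Nat) : ∀ (l cur : List Char) (acc : List (List Char)),
    l.length < fuel →
    PySem.Chars.splitOn.go [' '] fuel l cur acc
      = acc.reverse ++ (pvSp l).modifyHead (cur.reverse ++ ·) := by
  induction fuel with
  | zero => intro l cur acc h; omega
  | succ f ih =>
    intro l cur acc h
    cases l with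
    | nil =>
      simp [PySem.Chars.splitOn.go, pvSp, List.modifyHead]
    | cons c rest =>
      rw [PySem.Chars.splitOn.go]
      by_cases hc : c = ' '
      · subst hc
        rw [if_pos (by simp [List.isPrefixOf])]
        rw [show List.drop [' '].length (' ' :: rest) = rest from rfl]
        rw [ih rest [] (cur.reverse :: acc) (by simpa using Nat.lt_of_succ_lt_succ h)]
        simp [pvSp]
        cases hs : pvSp rest with
        | nil => exact absurd hs (pvSp_ne_nil rest)
        | cons a t => simp [List.modifyHead]
      · rw [if_neg (by simp [List.isPrefixOf]; intro hEq; exact hc hEq.symm)]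
        rw [ih rest (c :: cur) acc (by simpa using Nat.lt_of_succ_lt_succ h)]
        simp only [pvSp, if_neg hc]
        cases hs : pvSp rest with
        | nil => exact absurd hs (pvSp_ne_nil rest)
        | cons a t => simp [List.modifyHead]

lemma pvSplitOn_eq (cs : List Char) : PySem.Chars.splitOn cs [' '] = pvSp cs := by
  unfold PySem.Chars.splitOn
  rw [pvGo_eq (cs.length + 1) cs [] [] (by omega)]
  cases hs : pvSp cs with
  | nil => exact absurd hs (pvSp_ne_nil cs)
  | cons a t => simp [List.modifyHead]

-- number of nonempty pieces
def pvCnt (cs : List Char) : Nat := (pvSp cs).countP (fun w => !w.isEmpty)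

lemma pvCnt_cons_nonspace : ∀ (cs : List Char) (c : Char), c ≠ ' ' →
    pvCnt (c :: cs) = 1 + pvCnt (cs.dropWhile (· ≠ ' ')) := by
  intro cs
  induction cs with
  | nil => intro c hc; simp [pvCnt, pvSp, if_neg hc, List.modifyHead]
  | cons d cs' ih =>
    intro c hc
    by_cases hd : d = ' '
    · subst hd
      simp only [pvCnt, pvSp, if_neg hc, List.dropWhile]
      simp [pvSp, List.modifyHead, Nat.add_comm]
    · have h1 : pvCnt (c :: d :: cs') = pvCnt (d :: cs') := by
        obtain ⟨a, t, hs⟩ : ∃ a t, pvSp cs' = a :: t := by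
          cases hh : pvSp cs' with
          | nil => exact absurd hh (pvSp_ne_nil cs')
          | cons a t => exact ⟨a, t, rfl⟩
        simp [pvCnt, pvSp, if_neg hc, if_neg hd, hs, List.modifyHead]
      rw [h1, ih d hd]
      simp [List.dropWhile, hd]

lemma pvFold_spec : ∀ (cs : List Char) (r : Int),
    (cs.foldl (fun (st : Int × Int) c =>
        if c = ' ' ∧ st.2 = 1 then (st.1, 0)
        else if c ≠ ' ' ∧ st.2 = 0 then (st.1 + 1, 1)
        else st) (r, 0)).1 = r + (pvCnt cs : Int)
    ∧ (cs.foldl (fun (st : Int × Int) c =>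
        if c = ' ' ∧ st.2 = 1 then (st.1, 0)
        else if c ≠ ' ' ∧ st.2 = 0 then (st.1 + 1, 1)
        else st) (r, 1)).1 = r + (pvCnt (cs.dropWhile (· ≠ ' ')) : Int) := by
  intro cs
  induction cs with
  | nil => intro r; simp [pvCnt, pvSp]
  | cons c cs ih =>
    intro r
    by_cases hc : c = ' '
    · subst hc
      constructor
      · simp only [List.foldl]
        rw [if_neg (by simp), if_neg (by simp)]
        rw [(ih r).1]
        simp [pvCnt, pvSp]
      · simp only [List.foldl]
        rw [if_pos (by simp)]
        rw [(ih r).1]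
        simp [List.dropWhile, pvCnt, pvSp]
    · constructor
      · simp only [List.foldl]
        rw [if_neg (by exact fun h => hc h.1), if_pos (by exact ⟨hc, trivial⟩)]
        rw [(ih (r + 1)).2, pvCnt_cons_nonspace cs c hc]
        push_cast; ring
      · simp only [List.foldl]
        rw [if_neg (by exact fun h => hc h.1), if_neg (by exact fun h => by simpa using h.2)]
        rw [(ih r).2]
        simp [List.dropWhile, hc]

lemma pvAlt_eq (s : String) : countSegments2_alt s = (pvCnt s.toList : Int) := by
  unfold countSegments2_alt
  simp only [PySem.Str.split?, PySem.Chars.split?]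
  rw [if_neg (by simp)]
  simp only [Option.map_some]
  rw [show (" ").toList = [' '] from rfl, pvSplitOn_eq]
  congr 1
  rw [← List.countP_eq_length_filter, List.countP_map]
  unfold pvCnt
  congr 1
  funext w
  cases w with
  | nil => simp [Function.comp]
  | cons c t =>
    have hw : String.ofList (c :: t) ≠ "" := by
      intro h; have := congrArg String.toList h; simp at this
    simp [Function.comp, hw]

-- ===== VERDICT (by name: the statement is the Claim_ definition above) =====
theorem countSegments2_spec : Claim_equal_countSegments2 := by
  intro s _
  unfold Spec_countSegments2 countSegments2
  rw [pvAlt_eq, (pvFold_spec s.toList 0).1]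
  ring
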